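-- pv_equiv track=rewrite | github.com/SGiuri/triangle | triangle.py | is_valid_triangle
-- ===== SOURCE A (Python) =====
-- def degenerate(sides):
--
--     if (sides[0] + sides[1] == sides[2]) or (
--             sides[1] + sides[2] == sides[0]) or (
--             sides[2] + sides[0] == sides[1]):
--         return True
--     return False
--
-- def is_valid_triangle(sides):
--     if len(sides) != 3:
--         return False
--
--     for side in sides:
--         if side <= 0:
--             return False
--
--     if (sides[0] + sides[1] < sides[2]) or (
--             sides[1] + sides[2] < sides[0]) or (
--             sides[2] + sides[0] < sides[1]):
--         if degenerate(sides):
--             return True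
--         return False
--
--     return True
-- ===== SOURCE B (Python) =====
-- def is_valid_triangle(sides):
--     if len(sides) != 3:
--         return False
--     s = sorted(sides)
--     return s[0] > 0 and s[0] + s[1] >= s[2]
-- ===== Notes on version B (the rewrite author's own statement) =====
-- stated objective: simpler
-- what changed: Replaces the per-side positivity loop, three pairwise inequality checks and the (unreachable) degenerate helper with a sort followed by a single check on the smallest side and the largest side.
import Mathlib
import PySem

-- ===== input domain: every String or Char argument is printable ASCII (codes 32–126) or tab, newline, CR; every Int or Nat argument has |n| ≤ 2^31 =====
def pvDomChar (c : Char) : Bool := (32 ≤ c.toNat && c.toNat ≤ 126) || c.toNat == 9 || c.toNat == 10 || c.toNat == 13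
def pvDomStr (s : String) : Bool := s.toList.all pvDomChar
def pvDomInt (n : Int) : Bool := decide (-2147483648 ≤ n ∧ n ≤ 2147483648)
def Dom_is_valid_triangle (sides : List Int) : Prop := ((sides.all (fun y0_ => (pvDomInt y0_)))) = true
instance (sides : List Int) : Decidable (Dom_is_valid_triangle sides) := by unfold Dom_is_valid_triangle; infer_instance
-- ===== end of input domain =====

-- B replaces the positivity loop, the three pairwise checks and the unreachable
-- degenerate helper with sorted(sides) and one check on the extremes (objective: simpler).

-- ===== PORT A =====
def degenerate (a b c : Int) : Bool :=
  if (a + b == c) || (b + c == a) || (c + a == b) then true else false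

def is_valid_triangle (sides : List Int) : Bool :=
  if sides.length ≠ 3 then false
  else if sides.any (fun side => side ≤ 0) then false  -- the for-loop with early return False
  else
    match sides with  -- length is 3 here; names the three indexed elements sides[0..2]
    | [a, b, c] =>
      if (a + b < c) || (b + c < a) || (c + a < b) then
        if degenerate a b c then true else false
      else true
    | _ => false

-- ===== PORT B =====
def is_valid_triangle_alt (sides : List Int) : Bool :=
  if sides.length ≠ 3 then false
  else
    -- s = sorted(sides); length is 3 here, so s[0], s[1], s[2] never default
    let s := PySem.List.sorted sides (fun x => x) false
    decide (0 < s.getD 0 0) && decide (s.getD 0 0 + s.getD 1 0 ≥ s.getD 2 0)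

-- ===== PRECONDITION & SPEC =====
def Spec_is_valid_triangle (sides : List Int) (out : Bool) : Prop := out = is_valid_triangle_alt sides
instance (sides : List Int) (out : Bool) : Decidable (Spec_is_valid_triangle sides out) := by unfold Spec_is_valid_triangle; infer_instance

-- ===== CLAIM (what is proved, stated in full; the proofs are below) =====
def Claim_equal_is_valid_triangle : Prop := ∀ (sides : List Int), Dom_is_valid_triangle sides → Spec_is_valid_triangle sides (is_valid_triangle sides)

-- ===== LEMMAS AND PROOFS =====

-- ===== VERDICT (by name: the statement is the Claim_ definition above) =====
-- sorted of a three-element list, fully case-split by evaluation of the insertion sort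
theorem sorted3 (a b c : Int) :
    PySem.List.sorted [a, b, c] (fun x => x) false =
      if b < a then (if c < b then [c, b, a] else if c < a then [b, c, a] else [b, a, c])
      else (if c < a then [c, a, b] else if c < b then [a, c, b] else [a, b, c]) := by
  rw [PySem.List.sorted_eq_foldl_insertBy]
  simp only [List.foldl, PySem.List.insertBy]
  split_ifs <;> simp_all [PySem.List.insertBy] <;> split_ifs <;> simp_all <;> omega

theorem is_valid_triangle_spec : Claim_equal_is_valid_triangle := by
  intro sides _
  unfold Spec_is_valid_triangle is_valid_triangle is_valid_triangle_alt
  match sides with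
  | [] | [_] | [_, _] | _ :: _ :: _ :: _ :: _ => simp
  | [a, b, c] =>
    rw [sorted3]
    simp only [List.length_cons, List.length_nil, List.any, degenerate]
    split_ifs <;> simp_all <;> omega
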